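-- pv_equiv track=rewrite | github.com/KGebski0036/Kryptografia | Lab03/Szyfr2/de.py | find_possible_positions
-- ===== SOURCE A (Python) =====
-- def find_possible_positions(ciphertext, keyword):
--     positions = []
--     for i in range(len(ciphertext) - len(keyword) + 1):
--         mapping = {}
--         reverse_mapping = {}
--         conflict = False
--         for j in range(len(keyword)):
--             c_char = ciphertext[i + j]
--             p_char = keyword[j]
--             # Check for conflicting mappings
--             if c_char in mapping:
--                 if mapping[c_char] != p_char:
--                     conflict = True
--                     break
--             if p_char in reverse_mapping:
--                 if reverse_mapping[p_char] != c_char: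
--                     conflict = True
--                     break
--             mapping[c_char] = p_char
--             reverse_mapping[p_char] = c_char
--         if not conflict:
--             positions.append((i, mapping))
--     return positions
-- ===== SOURCE B (Python) =====
-- def find_possible_positions(ciphertext, keyword):
--     # Bijectivity of each window<->keyword alignment is checked by set cardinalities
--     # of the zipped pair list, instead of A's incremental two-dict conflict scan.
--     m = len(keyword)
--     kd = len(set(keyword))
--     positions = []
--     for i in range(len(ciphertext) - m + 1):
--         window = ciphertext[i:i+m]
--         pairs = list(zip(window, keyword))
--         if len(set(pairs)) == len(set(window)) and len(set(pairs)) == kd: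
--             positions.append((i, dict(pairs)))
--     return positions
-- ===== Notes on version B (the rewrite author's own statement) =====
-- stated objective: alternative
-- what changed: B replaces A's incremental two-dict conflict scan with early break by a per-window bijectivity test via set cardinalities of the zipped (window char, keyword char) pair list (|set(pairs)| == |set(window)| == |set(keyword)|), building the mapping once with dict(pairs) only for accepted windows.
import Mathlib
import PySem

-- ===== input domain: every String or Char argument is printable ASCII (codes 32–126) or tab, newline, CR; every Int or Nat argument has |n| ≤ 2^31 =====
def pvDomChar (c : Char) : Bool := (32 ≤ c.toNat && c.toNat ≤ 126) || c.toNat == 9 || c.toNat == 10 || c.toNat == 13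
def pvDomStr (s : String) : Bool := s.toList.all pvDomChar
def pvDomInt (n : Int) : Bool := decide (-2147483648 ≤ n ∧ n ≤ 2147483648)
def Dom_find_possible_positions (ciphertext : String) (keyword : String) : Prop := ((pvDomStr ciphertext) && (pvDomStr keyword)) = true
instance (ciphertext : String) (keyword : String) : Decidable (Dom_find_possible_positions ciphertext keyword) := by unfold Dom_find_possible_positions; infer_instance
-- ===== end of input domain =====

-- B checks each window<->keyword alignment for bijectivity by set cardinalities of the
-- zipped pair list instead of A's incremental two-dict conflict scan (objective: alternative).

-- ===== PORT A =====
-- a Python string as its list of 1-character strings (Python "characters" are strings)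
def fppChars (s : String) : List String := s.toList.map (fun c => String.ofList [c])

-- 'if c_char in mapping: if mapping[c_char] != p_char:' (and its reverse twin)
def fppHit (d : PySem.Dict String String) (k v : String) : Bool :=
  match d.get? k with
  | some w => w != v
  | none => false

-- one iteration of A's inner 'for j in range(len(keyword))' (first branch models the break)
def fppStep (cs ks : List String) (i : Int)
    (st : PySem.Dict String String × PySem.Dict String String × Bool) (j : Int) :
    PySem.Dict String String × PySem.Dict String String × Bool :=
  if st.2.2 then st
  else
    let c := PySem.List.pyGetD cs (i + j) ""
    let p := PySem.List.pyGetD ks j ""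
    if fppHit st.1 c p then (st.1, st.2.1, true)
    else if fppHit st.2.1 p c then (st.1, st.2.1, true)
    else (st.1.insert c p, st.2.1.insert p c, false)

def find_possible_positions (ciphertext : String) (keyword : String) :
    List (Int × (List (String × String))) :=
  let cs := fppChars ciphertext
  let ks := fppChars keyword
  (PySem.List.pyRange 0 ((cs.length : Int) - (ks.length : Int) + 1) 1).foldl
    (fun positions i =>
      let r := (PySem.List.pyRange 0 ((ks.length : Int)) 1).foldl (fppStep cs ks i)
        (PySem.Dict.empty, PySem.Dict.empty, false)
      if r.2.2 then positions else positions ++ [(i, r.1.items)]) []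

-- ===== PORT B =====
-- dict(pairs)
def fppDictOf (l : List (String × String)) : PySem.Dict String String :=
  l.foldl (fun d p => d.insert p.1 p.2) PySem.Dict.empty

def find_possible_positions_alt (ciphertext : String) (keyword : String) :
    List (Int × (List (String × String))) :=
  let cs := fppChars ciphertext
  let ks := fppChars keyword
  let kd := (PySem.Set.ofList ks).length
  (PySem.List.pyRange 0 ((cs.length : Int) - (ks.length : Int) + 1) 1).foldl
    (fun positions i =>
      let window := PySem.List.slice cs (some i) (some (i + (ks.length : Int)))
      let pairs := window.zip ks
      if (PySem.Set.ofList pairs).length = (PySem.Set.ofList window).length ∧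
         (PySem.Set.ofList pairs).length = kd
      then positions ++ [(i, (fppDictOf pairs).items)]
      else positions) []

-- ===== PRECONDITION & SPEC =====
def Spec_find_possible_positions (ciphertext : String) (keyword : String) (out : List (Int × (List (String × String)))) : Prop := out = find_possible_positions_alt ciphertext keyword
instance (ciphertext : String) (keyword : String) (out : List (Int × (List (String × String)))) : Decidable (Spec_find_possible_positions ciphertext keyword out) := by unfold Spec_find_possible_positions; infer_instance

-- ===== CLAIM (what is proved, stated in full; the proofs are below) =====
def Claim_equal_find_possible_positions : Prop := ∀ (ciphertext : String) (keyword : String), Dom_find_possible_positions ciphertext keyword → Spec_find_possible_positions ciphertext keyword (find_possible_positions ciphertext keyword)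

-- ===== LEMMAS AND PROOFS =====

-- the pair list is 'bijective': equal firsts force equal pairs, equal seconds force equal pairs
def fppGood (l : List (String × String)) : Prop :=
  (∀ p ∈ l, ∀ q ∈ l, p.1 = q.1 → p = q) ∧ (∀ p ∈ l, ∀ q ∈ l, p.2 = q.2 → p = q)

theorem fppGood_nil : fppGood [] := by constructor <;> intro p hp <;> simp at hp

theorem fppGood_of_append {l : List (String × String)} {x : String × String}
    (h : fppGood (l ++ [x])) : fppGood l := by
  obtain ⟨h1, h2⟩ := h
  exact ⟨fun p hp q hq => h1 p (by simp [hp]) q (by simp [hq]),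
         fun p hp q hq => h2 p (by simp [hp]) q (by simp [hq])⟩

theorem fppDictOf_append (l : List (String × String)) (x : String × String) :
    fppDictOf (l ++ [x]) = (fppDictOf l).insert x.1 x.2 := by
  simp [fppDictOf, List.foldl_append]

theorem fppDictOf_get?_mem {l : List (String × String)} {a b : String}
    (h : (fppDictOf l).get? a = some b) : (a, b) ∈ l := by
  induction l using List.reverseRecOn with
  | nil => simp [fppDictOf, PySem.Dict.get?_empty] at h
  | append_singleton xs x ih =>
      rw [fppDictOf_append, PySem.Dict.get?_insert] at h
      by_cases hax : a = x.1
      · subst hax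
        rw [if_pos rfl] at h
        cases h
        simp
      · simp only [if_neg hax] at h
        exact List.mem_append_left _ (ih h)

theorem fppDictOf_get?_of_mem_fst {l : List (String × String)} {a : String}
    (h : a ∈ l.map Prod.fst) : ∃ b, (fppDictOf l).get? a = some b := by
  induction l using List.reverseRecOn with
  | nil => simp at h
  | append_singleton xs x ih =>
      rw [fppDictOf_append, PySem.Dict.get?_insert]
      by_cases hax : a = x.1
      · exact ⟨x.2, by simp [hax]⟩
      · simp only [if_neg hax]
        apply ih
        simp only [List.map_append, List.map_cons, List.map_nil, List.mem_append,
          List.mem_singleton] at h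
        rcases h with h | h
        · exact h
        · exact absurd h hax

def fppRDictOf (l : List (String × String)) : PySem.Dict String String :=
  l.foldl (fun d p => d.insert p.2 p.1) PySem.Dict.empty

theorem fppRDictOf_eq (l : List (String × String)) :
    fppRDictOf l = fppDictOf (l.map (fun p => (p.2, p.1))) := by
  simp [fppRDictOf, fppDictOf, List.foldl_map]

theorem fppFun_map_swap (l : List (String × String)) :
    (∀ p ∈ l.map (fun p : String × String => (p.2, p.1)), ∀ q ∈ l.map (fun p : String × String => (p.2, p.1)), p.1 = q.1 → p = q)
    ↔ (∀ p ∈ l, ∀ q ∈ l, p.2 = q.2 → p = q) := by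
  constructor
  · intro h p hp q hq he
    have := h (p.2, p.1) (List.mem_map_of_mem hp) (q.2, q.1) (List.mem_map_of_mem hq) he
    exact Prod.ext (congrArg Prod.snd this) (congrArg Prod.fst this)
  · intro h p hp q hq he
    obtain ⟨p', hp', rfl⟩ := List.mem_map.mp hp
    obtain ⟨q', hq', rfl⟩ := List.mem_map.mp hq
    have := h p' hp' q' hq' he
    exact congrArg (fun r : String × String => (r.2, r.1)) this

theorem fppHit_false {l : List (String × String)} {x : String × String}
    (h : ∀ p ∈ l ++ [x], ∀ q ∈ l ++ [x], p.1 = q.1 → p = q) :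
    fppHit (fppDictOf l) x.1 x.2 = false := by
  unfold fppHit
  cases hw : (fppDictOf l).get? x.1 with
  | none => rfl
  | some w =>
      have hm : (x.1, w) ∈ l := fppDictOf_get?_mem hw
      have := h (x.1, w) (List.mem_append_left _ hm) x (List.mem_append_right _ (by simp)) rfl
      have hw2 : w = x.2 := congrArg Prod.snd this
      simp [hw2]

theorem fppHit_true {l : List (String × String)} {x : String × String}
    (hFun : ∀ p ∈ l, ∀ q ∈ l, p.1 = q.1 → p = q)
    (hviol : ¬ ∀ p ∈ l ++ [x], ∀ q ∈ l ++ [x], p.1 = q.1 → p = q) :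
    fppHit (fppDictOf l) x.1 x.2 = true := by
  -- extract a violating pair involving x
  rw [not_forall] at hviol
  simp only [not_forall, exists_prop] at hviol
  obtain ⟨p, hp, q, hq, he, hne⟩ := hviol
  rw [List.mem_append, List.mem_singleton] at hp hq
  have key : ∃ r ∈ l, r.1 = x.1 ∧ r ≠ x := by
    rcases hp with hp | hp
    · rcases hq with hq | hq
      · exact absurd (hFun p hp q hq he) hne
      · subst hq; exact ⟨p, hp, he, hne⟩
    · subst hp
      rcases hq with hq | hq
      · exact ⟨q, hq, he.symm, fun h => hne h.symm⟩
      · subst hq; exact absurd rfl hne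
  obtain ⟨r, hr, hr1, hrne⟩ := key
  obtain ⟨w, hw⟩ := fppDictOf_get?_of_mem_fst (l := l) (a := x.1)
    (hr1 ▸ List.mem_map_of_mem hr)
  have hmw : (x.1, w) ∈ l := fppDictOf_get?_mem hw
  have hwne : w ≠ x.2 := by
    intro hwx
    have : r = (x.1, w) := hFun r hr (x.1, w) hmw (by rw [hr1])
    exact hrne (by rw [this, hwx, Prod.ext_iff]; exact ⟨rfl, rfl⟩)
  unfold fppHit
  rw [hw]
  simp [hwne]

-- per-pair form of A's inner step (the two list reads already resolved)
def fppStepP (st : PySem.Dict String String × PySem.Dict String String × Bool)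
    (x : String × String) :
    PySem.Dict String String × PySem.Dict String String × Bool :=
  if st.2.2 then st
  else if fppHit st.1 x.1 x.2 then (st.1, st.2.1, true)
  else if fppHit st.2.1 x.2 x.1 then (st.1, st.2.1, true)
  else (st.1.insert x.1 x.2, st.2.1.insert x.2 x.1, false)

-- A's inner loop over the pair list: no conflict iff fppGood, and then the two dicts are dict(pairs)
theorem fppRun (l : List (String × String)) :
    (fppGood l → l.foldl fppStepP (PySem.Dict.empty, PySem.Dict.empty, false)
        = (fppDictOf l, fppRDictOf l, false))
  ∧ (¬ fppGood l → (l.foldl fppStepP (PySem.Dict.empty, PySem.Dict.empty, false)).2.2 = true) := by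
  induction l using List.reverseRecOn with
  | nil =>
      refine ⟨fun _ => rfl, fun h => absurd fppGood_nil h⟩
  | append_singleton xs x ih =>
      rw [List.foldl_append, List.foldl_cons, List.foldl_nil]
      by_cases hg : fppGood xs
      · rw [ih.1 hg]
        by_cases hgx : fppGood (xs ++ [x])
        · have h1 : fppHit (fppDictOf xs) x.1 x.2 = false := fppHit_false hgx.1
          have h2 : fppHit (fppRDictOf xs) x.2 x.1 = false := by
            rw [fppRDictOf_eq]
            exact fppHit_false (l := xs.map (fun p : String × String => (p.2, p.1)))
              (x := (x.2, x.1))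
              (by rw [show xs.map (fun p : String × String => (p.2, p.1)) ++ [((x.2 : String), (x.1 : String))]
                      = (xs ++ [x]).map (fun p : String × String => (p.2, p.1)) by simp,
                    fppFun_map_swap]
                  exact hgx.2)
          refine ⟨fun _ => ?_, fun h => absurd hgx h⟩
          simp only [fppStepP, h1, h2, Bool.false_eq_true, if_false]
          rw [fppDictOf_append, fppRDictOf_eq, fppRDictOf_eq]
          simp [fppDictOf_append]
        · refine ⟨fun h => absurd h hgx, fun _ => ?_⟩
          by_cases hfun : ∀ p ∈ xs ++ [x], ∀ q ∈ xs ++ [x], p.1 = q.1 → p = q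
          · -- second (reverse) check must fire
            have hinj : ¬ ∀ p ∈ xs ++ [x], ∀ q ∈ xs ++ [x], p.2 = q.2 → p = q :=
              fun h => hgx ⟨hfun, h⟩
            have h1 : fppHit (fppDictOf xs) x.1 x.2 = false := fppHit_false hfun
            have h2 : fppHit (fppRDictOf xs) x.2 x.1 = true := by
              rw [fppRDictOf_eq]
              apply fppHit_true (l := xs.map (fun p : String × String => (p.2, p.1)))
                (x := (x.2, x.1))
              · rw [fppFun_map_swap]; exact hg.2
              · rw [show xs.map (fun p : String × String => (p.2, p.1)) ++ [((x.2 : String), (x.1 : String))]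
                      = (xs ++ [x]).map (fun p : String × String => (p.2, p.1)) by simp,
                  fppFun_map_swap]
                exact hinj
            simp [fppStepP, h1, h2]
          · have h1 : fppHit (fppDictOf xs) x.1 x.2 = true := fppHit_true hg.1 hfun
            simp [fppStepP, h1]
      · have ht := ih.2 hg
        refine ⟨fun hgx => absurd (fppGood_of_append hgx) hg, fun _ => ?_⟩
        simp [fppStepP, ht]

-- |set(l)| is the Finset cardinality of l's members
theorem fppOfListLen {α : Type} [BEq α] [LawfulBEq α] [DecidableEq α] (l : List α) :
    (PySem.Set.ofList l).length = l.toFinset.card := by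
  have h1 : (PySem.Set.ofList l).toFinset = l.toFinset := by
    apply Finset.ext
    intro a
    simp [List.mem_toFinset, PySem.Set.mem_ofList]
  rw [← h1, List.toFinset_card_of_nodup (PySem.Set.nodup_ofList l)]

-- the set-cardinality test along a projection is exactly injectivity of that projection
theorem fppCardProj (l : List (String × String)) (f : String × String → String) :
    ((PySem.Set.ofList l).length = (PySem.Set.ofList (l.map f)).length)
    ↔ ∀ p ∈ l, ∀ q ∈ l, f p = f q → p = q := by
  have hmap : (l.map f).toFinset = l.toFinset.image f := Finset.ext fun b => by simp
  rw [fppOfListLen, fppOfListLen, hmap, eq_comm, Finset.card_image_iff]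
  constructor
  · intro h p hp q hq he
    exact h (by simp [hp]) (by simp [hq]) he
  · intro h a ha b hb he
    simp only [Finset.mem_coe, List.mem_toFinset] at ha hb
    exact h a ha b hb he

-- A's inner step, with both reads resolved against the zipped window/keyword pair list
theorem fppStep_eq (cs ks : List String) (i : Int) (hi0 : 0 ≤ i)
    (hlen : i.toNat + ks.length ≤ cs.length) (st : PySem.Dict String String × PySem.Dict String String × Bool)
    (j : Int) (hj : j ∈ PySem.List.pyRange 0 ((ks.length : Int)) 1) :
    fppStep cs ks i st j
      = fppStepP st (PySem.List.pyGetD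
          (((cs.drop i.toNat).take ks.length).zip ks) j ("", "")) := by
  rw [PySem.List.mem_pyRange_one] at hj
  obtain ⟨hj0, hjm⟩ := hj
  have hjN : j.toNat < ks.length := by omega
  have hwl : ((cs.drop i.toNat).take ks.length).length = ks.length := by
    simp only [List.length_take, List.length_drop]
    omega
  have hpl : (((cs.drop i.toNat).take ks.length).zip ks).length = ks.length := by
    simp only [List.length_zip, hwl, min_self]
  have hjp : (j.toNat : Int) < ((((cs.drop i.toNat).take ks.length).zip ks).length : Int) := by
    rw [hpl]; omega
  have hget : PySem.List.pyGetD (((cs.drop i.toNat).take ks.length).zip ks) j ("", "")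
      = (((cs.drop i.toNat).take ks.length).zip ks)[j.toNat]'(by omega) :=
    PySem.List.pyGetD_eq_getElem _ _ hj0 (by rw [hpl]; omega)
  have hzip : (((cs.drop i.toNat).take ks.length).zip ks)[j.toNat]'(by omega)
      = (((cs.drop i.toNat).take ks.length)[j.toNat]'(by omega), ks[j.toNat]'hjN) :=
    List.getElem_zip
  have hwj : ((cs.drop i.toNat).take ks.length)[j.toNat]'(by omega)
      = cs[i.toNat + j.toNat]'(by omega) := by
    rw [List.getElem_take, List.getElem_drop]
  have hc : PySem.List.pyGetD cs (i + j) "" = cs[i.toNat + j.toNat]'(by omega) := by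
    rw [PySem.List.pyGetD_eq_getElem cs "" (by omega) (by omega)]
    congr 1
    omega
  have hp : PySem.List.pyGetD ks j "" = ks[j.toNat]'hjN :=
    PySem.List.pyGetD_eq_getElem ks "" hj0 (by omega)
  rw [hget, hzip, hwj]
  simp only [fppStep, fppStepP, hc, hp]

-- one outer-loop body of A equals one outer-loop body of B
theorem fppBody_eq (cs ks : List String) (acc : List (Int × List (String × String))) (i : Int)
    (hi : i ∈ PySem.List.pyRange 0 ((cs.length : Int) - (ks.length : Int) + 1) 1) :
    (let r := (PySem.List.pyRange 0 ((ks.length : Int)) 1).foldl (fppStep cs ks i)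
        (PySem.Dict.empty, PySem.Dict.empty, false)
     if r.2.2 then acc else acc ++ [(i, r.1.items)])
    = (let window := PySem.List.slice cs (some i) (some (i + (ks.length : Int)))
       let pairs := window.zip ks
       if (PySem.Set.ofList pairs).length = (PySem.Set.ofList window).length ∧
          (PySem.Set.ofList pairs).length = (PySem.Set.ofList ks).length
       then acc ++ [(i, (fppDictOf pairs).items)]
       else acc) := by
  rw [PySem.List.mem_pyRange_one] at hi
  obtain ⟨hi0, hiu⟩ := hi
  have hlen : i.toNat + ks.length ≤ cs.length := by omega
  have hwin : PySem.List.slice cs (some i) (some (i + (ks.length : Int)))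
      = (cs.drop i.toNat).take ks.length := by
    rw [PySem.List.slice_toNat cs hi0 (by omega)]
    congr 1
    omega
  have hwl : ((cs.drop i.toNat).take ks.length).length = ks.length := by
    simp only [List.length_take, List.length_drop]
    omega
  have hfold : (PySem.List.pyRange 0 ((ks.length : Int)) 1).foldl (fppStep cs ks i)
      (PySem.Dict.empty, PySem.Dict.empty, false)
      = (((cs.drop i.toNat).take ks.length).zip ks).foldl fppStepP
        (PySem.Dict.empty, PySem.Dict.empty, false) := by
    rw [PySem.List.foldl_congr_mem _ _
        (fun st j => fppStepP st (PySem.List.pyGetD (((cs.drop i.toNat).take ks.length).zip ks) j ("", ""))) _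
        (fun st j hj => fppStep_eq cs ks i hi0 hlen st j hj)]
    rw [show ((ks.length : Int)) = (((((cs.drop i.toNat).take ks.length).zip ks)).length : Int) by
      simp only [List.length_zip, hwl, min_self]]
    exact PySem.List.foldl_pyRange_zero_pyGetD' _ ("", "") fppStepP _
  simp only [hwin, hfold]
  set pairs := ((cs.drop i.toNat).take ks.length).zip ks with hpairs
  have hfst : pairs.map Prod.fst = (cs.drop i.toNat).take ks.length :=
    List.map_fst_zip (le_of_eq hwl)
  have hsnd : pairs.map Prod.snd = ks :=
    List.map_snd_zip (le_of_eq hwl.symm)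
  by_cases hg : fppGood pairs
  · rw [(fppRun pairs).1 hg]
    have c1 : (PySem.Set.ofList pairs).length
        = (PySem.Set.ofList ((cs.drop i.toNat).take ks.length)).length := by
      rw [← hfst]
      exact (fppCardProj pairs Prod.fst).mpr hg.1
    have c2 : (PySem.Set.ofList pairs).length = (PySem.Set.ofList ks).length := by
      rw [← hsnd]
      exact (fppCardProj pairs Prod.snd).mpr hg.2
    rw [if_pos (And.intro c1 c2), if_neg (by simp)]
  · have ht := (fppRun pairs).2 hg
    have hnc : ¬((PySem.Set.ofList pairs).length
          = (PySem.Set.ofList ((cs.drop i.toNat).take ks.length)).length ∧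
        (PySem.Set.ofList pairs).length = (PySem.Set.ofList ks).length) := by
      intro hcc
      exact hg ⟨(fppCardProj pairs Prod.fst).mp (by rw [hfst]; exact hcc.1),
                (fppCardProj pairs Prod.snd).mp (by rw [hsnd]; exact hcc.2)⟩
    rw [if_pos ht, if_neg hnc]

-- ===== VERDICT (by name: the statement is the Claim_ definition above) =====
theorem find_possible_positions_spec : Claim_equal_find_possible_positions := by
  intro ciphertext keyword _
  unfold Spec_find_possible_positions find_possible_positions find_possible_positions_alt
  apply PySem.List.foldl_congr_mem
  intro acc i hi
  exact fppBody_eq (fppChars ciphertext) (fppChars keyword) acc i hi
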